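-- pv_equiv track=rewrite | github.com/idorabin60/itsLeet | wix/subDomain.py | solve_for_one_domain
-- ===== SOURCE A (Python) =====
-- def solve_for_one_domain(cpdomain):
--     result = []
--     number, domain = cpdomain.split()
--     parts = domain.split(".")
--
--     for i in range(len(parts)):
--         subdomain = ".".join(parts[i:])
--         result.append(f"{number}.{subdomain}")
--
--     return result
-- ===== SOURCE B (Python) =====
-- def solve_for_one_domain(cpdomain):
--     number, domain = cpdomain.split()
--     parts = domain.split(".")
--     out = []
--     suffix = None
--     for part in reversed(parts):
--         suffix = part if suffix is None else part + "." + suffix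
--         out.append(f"{number}.{suffix}")
--     out.reverse()
--     return out
-- ===== Notes on version B (the rewrite author's own statement) =====
-- stated objective: alternative
-- what changed: Instead of re-slicing parts[i:] and re-joining it for every i, B walks the labels once from the end, growing a single running suffix string and emitting each line, then reverses the output list.
-- outside the precondition, e.g. on solve_for_one_domain('9001'): A raises ValueError, B raises ValueError; on solve_for_one_domain('1 a b'): A raises ValueError, B raises ValueError
import Mathlib
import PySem

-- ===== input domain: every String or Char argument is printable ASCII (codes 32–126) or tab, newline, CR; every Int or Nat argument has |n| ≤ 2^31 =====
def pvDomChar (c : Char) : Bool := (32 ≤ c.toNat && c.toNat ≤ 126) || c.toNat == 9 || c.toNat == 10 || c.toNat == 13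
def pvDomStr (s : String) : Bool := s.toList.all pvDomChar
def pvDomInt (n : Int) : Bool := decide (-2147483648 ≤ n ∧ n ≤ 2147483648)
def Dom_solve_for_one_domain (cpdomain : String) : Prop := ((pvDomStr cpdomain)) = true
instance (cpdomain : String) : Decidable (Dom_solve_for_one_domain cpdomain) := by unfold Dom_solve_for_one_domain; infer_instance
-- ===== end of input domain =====

-- B builds each subdomain incrementally from the shortest suffix instead of re-slicing and
-- re-joining parts[i:] on every iteration (objective: alternative single-growing-suffix pass).

-- ===== PORT A =====
def solve_for_one_domain (cpdomain : String) : List String :=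
  match PySem.Chars.split₀ cpdomain.toList with
  | [number, domain] =>
    let parts := PySem.Chars.splitOn domain ['.']
    (PySem.List.pyRange 0 (parts.length : Int)).foldl
      (fun result i =>
        let subdomain := PySem.Chars.join ['.'] (PySem.List.slice parts (some i))
        result ++ [String.ofList (number ++ '.' :: subdomain)]) []
  | _ => []   -- cpdomain.split() does not give exactly two words: Python raises ValueError; excluded by Pre_

-- ===== PORT B =====
def solve_for_one_domain_alt (cpdomain : String) : List String :=
  let ws := PySem.Chars.split₀ cpdomain.toList
  if h : ws.length = 2 then
    let number := ws[0]
    let domain := ws[1]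
    let parts := PySem.Chars.splitOn domain ['.']
    let st := parts.reverse.foldl
      (fun (st : Option (List Char) × List String) part =>
        let suffix := match st.1 with
          | none => part
          | some s => part ++ '.' :: s
        (some suffix, st.2 ++ [String.ofList (number ++ '.' :: suffix)]))
      (none, [])
    st.2.reverse
  else []   -- as in A: the tuple unpacking of cpdomain.split() raises here

-- ===== PRECONDITION & SPEC =====
-- Pre_ excludes exactly the inputs where the two-variable unpacking of cpdomain.split() raises ValueError
-- (cpdomain does not consist of exactly two whitespace-separated words); both A and B raise there.
def Pre_solve_for_one_domain (cpdomain : String) : Prop :=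
  (PySem.Str.split₀ cpdomain).length = 2
instance (cpdomain : String) : Decidable (Pre_solve_for_one_domain cpdomain) := by
  unfold Pre_solve_for_one_domain; infer_instance

def pvWitness_solve_for_one_domain : String := "9001 discuss.leetcode.com"

def Spec_solve_for_one_domain (cpdomain : String) (out : List String) : Prop := out = solve_for_one_domain_alt cpdomain
instance (cpdomain : String) (out : List String) : Decidable (Spec_solve_for_one_domain cpdomain out) := by unfold Spec_solve_for_one_domain; infer_instance

-- ===== CLAIM (what is proved, stated in full; the proofs are below) =====
def Claim_equal_solve_for_one_domain : Prop := ∀ (cpdomain : String), Dom_solve_for_one_domain cpdomain → Pre_solve_for_one_domain cpdomain → Spec_solve_for_one_domain cpdomain (solve_for_one_domain cpdomain)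

-- ===== LEMMAS AND PROOFS =====

-- B's loop, folded from the right: the running suffix is the dot-join of the remaining parts,
-- and the emitted lines are A's lines in reverse order.
theorem pvLoopB (number : List Char) (parts : List (List Char)) (hp : parts ≠ []) :
    parts.foldr
      (fun part (st : Option (List Char) × List String) =>
        let suffix := match st.1 with
          | none => part
          | some s => part ++ '.' :: s
        (some suffix, st.2 ++ [String.ofList (number ++ '.' :: suffix)]))
      (none, [])
    = (some (PySem.Chars.join ['.'] parts),
       ((List.range parts.length).map
          (fun k => String.ofList (number ++ '.' :: PySem.Chars.join ['.'] (parts.drop k)))).reverse) := by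
  induction parts with
  | nil => exact absurd rfl hp
  | cons p rest ih =>
    cases rest with
    | nil => simp [PySem.Chars.join_singleton]
    | cons q rest' =>
      rw [List.foldr_cons, ih (by simp)]
      simp only [List.length_cons, List.range_succ_eq_map, List.map_cons, List.map_map,
        List.reverse_cons]
      refine congrArg₂ Prod.mk ?_ ?_
      · simp [PySem.Chars.join_cons_cons]
      · refine congrArg₂ (· ++ ·) (by rfl) ?_
        simp [PySem.Chars.join_cons_cons]

theorem solve_for_one_domain_eq (cpdomain : String)
    (hpre : Pre_solve_for_one_domain cpdomain) :
    solve_for_one_domain cpdomain = solve_for_one_domain_alt cpdomain := by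
  have hlen : (PySem.Chars.split₀ cpdomain.toList).length = 2 := by
    rw [← PySem.Str.split₀_map_toList, List.length_map]; exact hpre
  obtain ⟨number, domain, h⟩ := List.length_eq_two.mp hlen
  unfold solve_for_one_domain solve_for_one_domain_alt
  simp only [h, List.length_cons, List.length_nil, Nat.zero_add]
  simp only [List.getElem_cons_zero, List.getElem_cons_succ]
  -- A's loop as a map over List.range
  rw [PySem.List.pyRange_zero_nat, List.foldl_map, PySem.List.foldl_append_singleton_eq_map,
    List.nil_append]
  simp only [PySem.List.slice_from_natCast]
  -- B's loop as a foldr, then the loop lemma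
  rw [List.foldl_reverse]
  cases hparts : PySem.Chars.splitOn domain ['.'] with
  | nil => simp
  | cons p rest =>
    rw [pvLoopB number (p :: rest) (by simp)]
    simp

-- ===== VERDICT (by name: the statement is the Claim_ definition above) =====
theorem solve_for_one_domain_spec : Claim_equal_solve_for_one_domain := by
  intro cpdomain _ hpre
  unfold Spec_solve_for_one_domain
  exact (solve_for_one_domain_eq cpdomain hpre).symm ▸ rfl
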